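-- pv_equiv track=rewrite | github.com/alsabahi2030/MH-GEC | utils/gec_utils.py | multi_same_tag
-- ===== SOURCE A (Python) =====
-- def multi_same_tag(all_tags, words, num=3):
--     """
--     :param all_tags:
--     :param words:
--     :param num:
--     :return:
--     """
--     count = 0
--     for tag in all_tags:
--         if tag in words:
--             count += 1
--         else:
--             count = 0
--         if count == num:
--             return True
--
--     if count >= num:
--         return True
--     else:
--         return False
-- ===== SOURCE B (Python) =====
-- def multi_same_tag(all_tags, words, num=3):
--     if num > len(all_tags):
--         return False
--     bits = ''.join('1' if tag in words else '0' for tag in all_tags)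
--     return '1' * num in bits
-- ===== Notes on version B (the rewrite author's own statement) =====
-- stated objective: idiomatic
-- what changed: Replaces the consecutive-hit counter with increment/reset branches and an early return by an early impossibility check (num > len(all_tags)) followed by building a membership bit-string in one pass and testing whether '1'*num is a substring of it.
import Mathlib
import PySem

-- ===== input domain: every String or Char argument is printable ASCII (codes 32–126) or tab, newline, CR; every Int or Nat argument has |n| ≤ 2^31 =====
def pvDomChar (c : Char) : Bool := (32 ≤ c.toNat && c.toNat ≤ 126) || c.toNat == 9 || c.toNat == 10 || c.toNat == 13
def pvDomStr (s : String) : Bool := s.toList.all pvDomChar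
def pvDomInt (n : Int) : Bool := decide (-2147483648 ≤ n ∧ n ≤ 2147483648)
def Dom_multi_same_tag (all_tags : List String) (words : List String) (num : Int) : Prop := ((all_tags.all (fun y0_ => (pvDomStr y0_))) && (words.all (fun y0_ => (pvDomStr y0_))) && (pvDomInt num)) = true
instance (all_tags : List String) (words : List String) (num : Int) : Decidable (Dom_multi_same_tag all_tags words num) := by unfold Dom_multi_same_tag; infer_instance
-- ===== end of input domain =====

-- B replaces A's consecutive-hit counter with a membership bit-string and a substring
-- test ('1'*num in bits); objective: idiomatic, same cost.

-- ===== PORT A =====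
-- A's loop: count of consecutive hits, reset on miss, early return when count == num,
-- final check count >= num.
def pvLoopA (words : List String) (num : Int) : List String → Int → Bool
  | [], count => decide (num ≤ count)
  | tag :: rest, count =>
    let count' := if words.contains tag then count + 1 else 0
    if count' = num then true else pvLoopA words num rest count'

def multi_same_tag (all_tags : List String) (words : List String) (num : Int) : Bool :=
  pvLoopA words num all_tags 0

-- ===== PORT B =====
-- if num > len(all_tags): return False
-- bits = ''.join('1' if tag in words else '0' for tag in all_tags)
-- return '1' * num in bits
def multi_same_tag_alt (all_tags : List String) (words : List String) (num : Int) : Bool :=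
  if (all_tags.length : Int) < num then false
  else
    let bits : List Char := all_tags.map (fun tag => if words.contains tag then '1' else '0')
    PySem.Chars.isIn (PySem.List.pyRepeat ['1'] num) bits

-- ===== PRECONDITION & SPEC =====
def Spec_multi_same_tag (all_tags : List String) (words : List String) (num : Int) (out : Bool) : Prop := out = multi_same_tag_alt all_tags words num
instance (all_tags : List String) (words : List String) (num : Int) (out : Bool) : Decidable (Spec_multi_same_tag all_tags words num out) := by unfold Spec_multi_same_tag; infer_instance

-- ===== CLAIM (what is proved, stated in full; the proofs are below) =====
def Claim_equal_multi_same_tag : Prop := ∀ (all_tags : List String) (words : List String) (num : Int), Dom_multi_same_tag all_tags words num → Spec_multi_same_tag all_tags words num (multi_same_tag all_tags words num)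

-- ===== LEMMAS AND PROOFS =====

theorem pv_replicate_prefix {j k : Nat} (a : Char) (h : j ≤ k) :
    List.replicate j a <+: List.replicate k a :=
  ⟨List.replicate (k - j) a, by rw [← List.replicate_add]; congr 1; omega⟩

-- When num ≤ 0, A's loop always ends (or early-returns) with a count ≥ num.
theorem pv_loopA_nonpos (words : List String) (num : Int) (hn : num ≤ 0) :
    ∀ (ts : List String) (count : Int), 0 ≤ count → pvLoopA words num ts count = true := by
  intro ts
  induction ts with
  | nil => intro count hc; simp [pvLoopA]; omega
  | cons tag rest ih =>
    intro count hc
    simp only [pvLoopA]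
    by_cases hw : words.contains tag = true
    · simp only [hw, if_true]
      by_cases he : count + 1 = num
      · rw [if_pos he]
      · rw [if_neg he]; exact ih _ (by omega)
    · simp only [Bool.not_eq_true] at hw
      simp only [hw, Bool.false_eq_true, if_false]
      by_cases he : (0 : Int) = num
      · rw [if_pos he]
      · rw [if_neg he]; exact ih 0 le_rfl

-- Main invariant: for 0 ≤ count < num, A's loop succeeds iff the remaining bits start
-- with (num-count) ones, or contain num consecutive ones somewhere.
theorem pv_loopA_invariant (words : List String) (num : Int) (hn : 0 < num) :
    ∀ (ts : List String) (count : Int), 0 ≤ count → count < num →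
      (pvLoopA words num ts count = true ↔
        List.replicate (num - count).toNat '1' <+:
          ts.map (fun tag => if words.contains tag then '1' else '0') ∨
        List.replicate num.toNat '1' <:+:
          ts.map (fun tag => if words.contains tag then '1' else '0')) := by
  intro ts
  induction ts with
  | nil =>
    intro count hc0 hcn
    have h1 : (num - count).toNat ≠ 0 := by omega
    have h2 : num.toNat ≠ 0 := by omega
    simp [pvLoopA, List.prefix_nil, List.replicate_eq_nil_iff, h1, h2]
    omega
  | cons tag rest ih =>
    intro count hc0 hcn
    simp only [pvLoopA, List.map_cons]
    by_cases hw : words.contains tag = true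
    · simp only [hw, if_true]
      by_cases heq : count + 1 = num
      · -- early return: count' = num
        have hrep : (num - count).toNat = 1 := by omega
        rw [if_pos heq]
        refine iff_of_true rfl (Or.inl ?_)
        rw [hrep]
        exact ⟨_, rfl⟩
      · have hlt : count + 1 < num := by omega
        rw [if_neg heq, ih (count + 1) (by omega) hlt]
        have e1 : (num - count).toNat = (num - (count + 1)).toNat + 1 := by omega
        have e2 : num.toNat = (num - 1).toNat + 1 := by omega
        constructor
        · rintro (hpre | hinf)
          · refine Or.inl ?_
            rw [e1, List.replicate_succ]
            exact (List.cons_prefix_cons).2 ⟨rfl, hpre⟩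
          · exact Or.inr ((List.infix_cons_iff).2 (Or.inr hinf))
        · rintro (hpre | hinf)
          · rw [e1, List.replicate_succ] at hpre
            exact Or.inl ((List.cons_prefix_cons).1 hpre).2
          · rcases (List.infix_cons_iff).1 hinf with hpre | hinf'
            · -- num ones prefix of '1' :: bits rest ⇒ (num-1) ones prefix of bits rest
              rw [e2, List.replicate_succ] at hpre
              have htail := ((List.cons_prefix_cons).1 hpre).2
              exact Or.inl (List.IsPrefix.trans
                (pv_replicate_prefix '1'
                  (by omega : (num - (count + 1)).toNat ≤ (num - 1).toNat)) htail)
            · exact Or.inr hinf'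
    · -- miss: count resets to 0
      simp only [Bool.not_eq_true] at hw
      simp only [hw, Bool.false_eq_true, if_false]
      have hzn : ¬ ((0 : Int) = num) := by omega
      rw [if_neg hzn, ih 0 le_rfl hn]
      have hz : ((num : Int) - 0).toNat = num.toNat := by omega
      rw [hz]
      constructor
      · rintro (hpre | hinf)
        · exact Or.inr ((List.infix_cons_iff).2 (Or.inr hpre.isInfix))
        · exact Or.inr ((List.infix_cons_iff).2 (Or.inr hinf))
      · rintro (hpre | hinf)
        · -- replicate '1's cannot be a prefix of '0' :: _
          exfalso
          obtain ⟨n, hn0⟩ : ∃ n, (num - count).toNat = n + 1 := ⟨(num - count).toNat - 1, by omega⟩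
          rw [hn0, List.replicate_succ, List.cons_prefix_cons] at hpre
          exact absurd hpre.1 (by decide)
        · rcases (List.infix_cons_iff).1 hinf with hpre | hinf'
          · exfalso
            obtain ⟨n, hn0⟩ : ∃ n, num.toNat = n + 1 := ⟨num.toNat - 1, by omega⟩
            rw [hn0, List.replicate_succ, List.cons_prefix_cons] at hpre
            exact absurd hpre.1 (by decide)
          · exact Or.inr hinf'

-- ===== VERDICT (by name: the statement is the Claim_ definition above) =====
theorem multi_same_tag_spec : Claim_equal_multi_same_tag := by
  intro all_tags words num _
  unfold Spec_multi_same_tag multi_same_tag multi_same_tag_alt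
  by_cases hbig : (all_tags.length : Int) < num
  · rw [if_pos hbig]
    have hn : 0 < num := by
      have : (0 : Int) ≤ all_tags.length := Int.natCast_nonneg _
      omega
    have hmain := pv_loopA_invariant words num hn all_tags 0 le_rfl hn
    have hz : (num - 0).toNat = num.toNat := by omega
    rw [hz] at hmain
    rcases hb : pvLoopA words num all_tags 0 with _ | _
    · rfl
    · exfalso
      have hlen : all_tags.length < num.toNat := by omega
      have hmaplen : (all_tags.map (fun tag =>
          if words.contains tag then '1' else '0')).length = all_tags.length :=
        List.length_map ..
      rcases hmain.1 hb with hpre | hinf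
      · have := hpre.length_le
        simp only [List.length_replicate, hmaplen] at this
        omega
      · have := hinf.length_le
        simp only [List.length_replicate, hmaplen] at this
        omega
  · rw [if_neg hbig, PySem.List.pyRepeat_singleton]
    by_cases hn : 0 < num
    · have hmain := pv_loopA_invariant words num hn all_tags 0 le_rfl hn
      have hz : (num - 0).toNat = num.toNat := by omega
      rw [hz] at hmain
      rcases hi : PySem.Chars.isIn (List.replicate num.toNat '1')
          (all_tags.map (fun tag => if words.contains tag then '1' else '0')) with _ | _
      · rcases hb : pvLoopA words num all_tags 0 with _ | _
        · rfl
        · exfalso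
          rw [PySem.Chars.isIn_eq_false_iff] at hi
          rcases hmain.1 hb with hpre | hinf
          · exact hi hpre.isInfix
          · exact hi hinf
      · exact hmain.2 (Or.inr ((PySem.Chars.isIn_iff_infix _ _).1 hi))
    · have h0 : num.toNat = 0 := by omega
      rw [h0, List.replicate_zero, PySem.Chars.isIn_nil,
        pv_loopA_nonpos words num (by omega) all_tags 0 le_rfl]
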